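-- pv_equiv track=rewrite | github.com/joaocarvoli/nlp-symbolic-solution | symbolic/src/symbolic/utils/sentiment.py | reduce_neutrality
-- ===== SOURCE A (Python) =====
-- def word_sentiment(word: str, words: dict[str, list[int]]):
--     if word not in words or 30 not in words[word]:
--         return 0
--     elif 31 in words[word]:
--         return 1
--     elif {32, 33, 34, 35} & set(words[word]):
--         return -1
--     else:
--         return 0
--
-- def reduce_neutrality(word_list: list[str], words: dict[str, list[int]]):
--     words_sentiments = [word_sentiment(word, words) for word in word_list]
--     result_list = words_sentiments[:]
--     i = 0
--     while i < len(words_sentiments):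
--         if words_sentiments[i] == 0:
--             start = i
--             while i < len(words_sentiments) and words_sentiments[i] == 0:
--                 i += 1
--             end = i
--
--             if start > 0 and end < len(words_sentiments):
--                 if words_sentiments[start - 1] == words_sentiments[end] and words_sentiments[start - 1] in [-1, 1]:
--                     for j in range(start, end):
--                         result_list[j] = words_sentiments[start - 1]
--         else:
--             i += 1
--     return sum(result_list)
-- ===== SOURCE B (Python) =====
-- def word_sentiment(word: str, words: dict[str, list[int]]):
--     if word not in words or 30 not in words[word]:
--         return 0
--     elif 31 in words[word]:
--         return 1
--     elif {32, 33, 34, 35} & set(words[word]):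
--         return -1
--     else:
--         return 0
--
-- def runs_of(xs):
--     """Run-length encode xs: list of (value, length) of maximal equal runs.
--
--     Each step emits one run: count how many of the following elements equal the
--     current head, append (head, 1 + same), and continue after the run."""
--     runs = []
--     i = 0
--     while i < len(xs):
--         head = xs[i]
--         same = 0
--         while i + 1 + same < len(xs) and xs[i + 1 + same] == head:
--             same += 1
--         runs.append((head, 1 + same))
--         i = i + 1 + same
--     return runs
--
-- def reduce_neutrality(word_list: list[str], words: dict[str, list[int]]):
--     sentiments = [word_sentiment(word, words) for word in word_list]
--     runs = runs_of(sentiments)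
--     total = sum(sentiments)
--     # every interior zero-run flanked by the same non-neutral value v counts as v per word
--     for (a, _), (z, n), (c, _) in zip(runs, runs[1:], runs[2:]):
--         if z == 0 and a == c and (a == -1 or a == 1):
--             total += a * n
--     return total
-- ===== Notes on version B (the rewrite author's own statement) =====
-- stated objective: alternative
-- what changed: Replaces A's two-pointer index scan that mutates a copied result list with a run-length encoding of the sentiment list followed by a sliding-window pass over (value, length) run triples that adds corrections for interior zero-runs directly to the sum.
import Mathlib
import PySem

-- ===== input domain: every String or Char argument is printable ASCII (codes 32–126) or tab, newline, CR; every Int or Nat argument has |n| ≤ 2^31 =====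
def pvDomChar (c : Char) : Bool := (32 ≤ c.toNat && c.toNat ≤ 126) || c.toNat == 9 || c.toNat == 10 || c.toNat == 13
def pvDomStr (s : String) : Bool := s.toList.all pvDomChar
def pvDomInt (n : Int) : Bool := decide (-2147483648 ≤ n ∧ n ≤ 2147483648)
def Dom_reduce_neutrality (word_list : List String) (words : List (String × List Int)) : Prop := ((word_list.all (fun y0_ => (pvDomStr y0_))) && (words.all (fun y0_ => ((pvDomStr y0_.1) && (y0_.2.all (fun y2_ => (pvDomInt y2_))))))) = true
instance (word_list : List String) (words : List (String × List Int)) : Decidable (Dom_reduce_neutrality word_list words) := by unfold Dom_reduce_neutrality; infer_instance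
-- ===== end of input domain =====

-- B replaces A's two-pointer index scan over a mutated copy of the sentiment list by a
-- run-length encoding plus a sliding-window pass over run triples (objective: alternative).

-- ===== PORT A =====
-- shared helper: word_sentiment (identical in Source A and Source B)
def word_sentiment (word : String) (words : List (String × List Int)) : Int :=
  match (words.find? (fun p => p.1 == word)).map (fun p => p.2) with
  | none => 0                                 -- `word not in words` (dict lookup = first match)
  | some ws =>
    if ws.contains 30 = false then 0          -- `or 30 not in words[word]`
    else if ws.contains 31 then 1
    else if ws.contains 32 || ws.contains 33 || ws.contains 34 || ws.contains 35 then -1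
         -- exact port of `{32,33,34,35} & set(words[word])` being non-empty
    else 0

-- inner `while i < len(ws) and ws[i] == 0: i += 1`
def innerWhile (s : List Int) (i : Nat) : Nat :=
  if _h : i < s.length ∧ s.getD i 0 = 0 then innerWhile s (i + 1) else i
termination_by s.length - i
decreasing_by omega

-- `for j in range(start, end): result_list[j] = v`
def fillRange (r : List Int) (a b : Nat) (v : Int) : List Int :=
  (List.range' a (b - a)).foldl (fun acc j => acc.set j v) r

theorem innerWhile_ge (s : List Int) (i : Nat) : i ≤ innerWhile s i := by
  fun_induction innerWhile s i with
  | case1 i h ih => omega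
  | case2 i h => omega

theorem innerWhile_gt (s : List Int) (i : Nat) (h1 : i < s.length) (h2 : s.getD i 0 = 0) :
    i < innerWhile s i := by
  rw [innerWhile, dif_pos ⟨h1, h2⟩]
  exact Nat.lt_of_lt_of_le (Nat.lt_succ_self i) (innerWhile_ge s (i + 1))

-- outer `while i < len(words_sentiments)` loop, state (result_list, i)
def outerLoop (s : List Int) (r : List Int) (i : Nat) : List Int :=
  if hlt : i < s.length then
    if hz : s.getD i 0 = 0 then
      let start := i
      let e := innerWhile s i
      let r' :=
        if 0 < start ∧ e < s.length then
          if s.getD (start - 1) 0 = s.getD e 0 ∧ (s.getD (start - 1) 0 = -1 ∨ s.getD (start - 1) 0 = 1) then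
            fillRange r start e (s.getD (start - 1) 0)
          else r
        else r
      outerLoop s r' e
    else outerLoop s r (i + 1)
  else r
termination_by s.length - i
decreasing_by
  · have := innerWhile_gt s i hlt hz; omega
  · omega

def reduce_neutrality (word_list : List String) (words : List (String × List Int)) : Int :=
  let words_sentiments := word_list.map (fun w => word_sentiment w words)
  (outerLoop words_sentiments words_sentiments 0).sum

-- ===== PORT B =====
-- run-length encoding (Source B's recursive runs_of; the while-count of the equal prefix is takeWhile's length)
def runsOf : List Int → List (Int × Nat)
  | [] => []
  | x :: rest =>
    let same := (rest.takeWhile (fun y => y == x)).length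
    (x, 1 + same) :: runsOf (rest.drop same)
termination_by l => l.length
decreasing_by simp

-- Source B's `for (a,_),(z,n),(c,_) in zip(runs, runs[1:], runs[2:])` accumulation
def gapSum : List (Int × Nat) → Int
  | (a, _) :: (z, n) :: (c, m) :: rest =>
    (if z = 0 ∧ a = c ∧ (a = -1 ∨ a = 1) then a * (n : Int) else 0) + gapSum ((z, n) :: (c, m) :: rest)
  | _ => 0

def reduce_neutrality_alt (word_list : List String) (words : List (String × List Int)) : Int :=
  let sentiments := word_list.map (fun w => word_sentiment w words)
  let runs := runsOf sentiments
  sentiments.sum + gapSum runs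

-- ===== PRECONDITION & SPEC =====
def Spec_reduce_neutrality (word_list : List String) (words : List (String × List Int)) (out : Int) : Prop := out = reduce_neutrality_alt word_list words
instance (word_list : List String) (words : List (String × List Int)) (out : Int) : Decidable (Spec_reduce_neutrality word_list words out) := by unfold Spec_reduce_neutrality; infer_instance

-- ===== CLAIM (what is proved, stated in full; the proofs are below) =====
def Claim_equal_reduce_neutrality : Prop := ∀ (word_list : List String) (words : List (String × List Int)), Dom_reduce_neutrality word_list words → Spec_reduce_neutrality word_list words (reduce_neutrality word_list words)

-- ===== LEMMAS AND PROOFS =====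

-- common functional description of both passes: fSpec p l = sum of the final values of the
-- suffix l of the sentiment list, p being the element just before l (0 = none / neutral)
def fSpec (p : Int) (l : List Int) : Int :=
  match l with
  | [] => 0
  | x :: t =>
    if _hx : x = 0 then
      match _hr : (x :: t).dropWhile (fun y => y == 0) with
      | [] => 0
      | y :: t' =>
        (if p = y ∧ (p = -1 ∨ p = 1) then p * (((x :: t).takeWhile (fun y => y == 0)).length : Int) else 0)
          + y + fSpec y t'
  else x + fSpec x t
termination_by l.length
decreasing_by
  · subst _hx
    have hle := List.length_dropWhile_le (fun y => y == 0) (0 :: t)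
    rw [_hr] at hle
    simp at hle ⊢
    omega
  · simp

theorem fSpec_cons_zero_nil (p : Int) (t : List Int)
    (h : (0 :: t).dropWhile (fun y => y == 0) = []) : fSpec p (0 :: t) = 0 := by
  rw [fSpec]
  split
  · split
    next heq => rfl
    next y2 t2 heq => rw [h] at heq; cases heq
  · next hne => exact absurd rfl hne

theorem fSpec_cons_zero (p y : Int) (t t' : List Int)
    (h : (0 :: t).dropWhile (fun y => y == 0) = y :: t') :
    fSpec p (0 :: t) = (if p = y ∧ (p = -1 ∨ p = 1) then p * (((0 :: t).takeWhile (fun y => y == 0)).length : Int) else 0) + y + fSpec y t' := by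
  rw [fSpec]
  split
  · split
    next heq => rw [h] at heq; cases heq
    next y2 t2 heq =>
      rw [h] at heq
      injection heq with h1 h2
      subst h1; subst h2; rfl
  · next hne => exact absurd rfl hne

theorem fSpec_cons_ne (p x : Int) (t : List Int) (hx : x ≠ 0) :
    fSpec p (x :: t) = x + fSpec x t := by
  rw [fSpec]; simp [hx]

theorem dropWhile_head_false {α : Type} (p : α → Bool) :
    ∀ (l : List α) (y : α) (t' : List α), l.dropWhile p = y :: t' → p y = false := by
  intro l
  induction l with
  | nil => intro y t' h; cases h
  | cons a l1 ih =>
    intro y t' h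
    rw [List.dropWhile_cons] at h
    by_cases ha : p a
    · rw [if_pos ha] at h; exact ih y t' h
    · rw [if_neg ha] at h
      injection h with h1 _
      subst h1
      simpa using ha

theorem dropWhile_eq_drop_takeWhile_length {α : Type} (p : α → Bool) (l : List α) :
    l.dropWhile p = l.drop (l.takeWhile p).length := by
  induction l with
  | nil => rfl
  | cons a t ih => by_cases h : p a <;> simp [List.takeWhile_cons, h, ih]

theorem sum_takeWhile_zero (l : List Int) : (l.takeWhile (fun y => y == 0)).sum = 0 := by
  apply List.sum_eq_zero
  intro x hx
  have := List.mem_takeWhile_imp hx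
  simpa using this

theorem innerWhile_eq (s : List Int) (i : Nat) :
    innerWhile s i = i + ((s.drop i).takeWhile (fun y => y == 0)).length := by
  fun_induction innerWhile s i with
  | case1 i h ih =>
    obtain ⟨h1, h2⟩ := h
    have hdrop : s.drop i = s.getD i 0 :: s.drop (i + 1) := by
      rw [List.getD_eq_getElem _ _ h1, List.drop_eq_getElem_cons h1]
    rw [ih, hdrop, h2]
    simp
    omega
  | case2 i h =>
    by_cases h1 : i < s.length
    · have h2 : ¬ s.getD i 0 = 0 := fun hc => h ⟨h1, hc⟩
      have hdrop : s.drop i = s.getD i 0 :: s.drop (i + 1) := by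
        rw [List.getD_eq_getElem _ _ h1, List.drop_eq_getElem_cons h1]
      rw [hdrop, List.takeWhile_cons,
          show ((s.getD i 0 == 0)) = false by simpa using h2]
      simp
    · have : s.drop i = [] := by simp; omega
      simp [this]

theorem innerWhile_stop (s : List Int) (i : Nat) (h : innerWhile s i < s.length) :
    s.getD (innerWhile s i) 0 ≠ 0 := by
  fun_induction innerWhile s i with
  | case1 i hc ih => exact ih h
  | case2 i hc => intro hz; exact hc ⟨h, hz⟩

theorem fillRange_eq (v : Int) : ∀ (n a : Nat) (r : List Int), a + n ≤ r.length →
    fillRange r a (a + n) v = r.take a ++ List.replicate n v ++ r.drop (a + n) := by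
  intro n
  induction n with
  | zero => intro a r h; simp [fillRange]
  | succ n ih =>
    intro a r h
    have ha : a < r.length := by omega
    have hstep : fillRange r a (a + (n + 1)) v = fillRange (r.set a v) (a + 1) ((a + 1) + n) v := by
      unfold fillRange
      have h1 : a + (n + 1) - a = n + 1 := by omega
      have h2 : (a + 1) + n - (a + 1) = n := by omega
      rw [h1, h2, List.range'_succ]
      simp
    have hset : r.set a v = r.take a ++ v :: r.drop (a + 1) := by
      rw [List.set_eq_take_append_cons_drop, if_pos ha]
    rw [hstep, ih (a + 1) (r.set a v) (by simp; omega), hset,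
        List.take_append, List.drop_append]
    have hlen : (r.take a).length = a := by simp; omega
    rw [hlen]
    have h3 : a + 1 - a = 1 := by omega
    have h4 : (r.take a).take (a + 1) = r.take a := by
      rw [List.take_take]; congr 1; omega
    have h5 : (r.take a).drop (a + 1 + n) = [] := by
      apply List.drop_eq_nil_of_le; omega
    have h6 : a + 1 + n - a = n + 1 := by omega
    rw [h3, h4, h5, h6]
    simp [List.replicate_succ, List.drop_drop]
    omega

theorem drop_eq_of_drop_eq {r s : List Int} {i j : Nat}
    (h : r.drop i = s.drop i) (hij : i ≤ j) : r.drop j = s.drop j := by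
  have h2 := congrArg (List.drop (j - i)) h
  rw [List.drop_drop, List.drop_drop, show i + (j - i) = j by omega] at h2
  exact h2

theorem drop_eq_getD_cons {s : List Int} {i : Nat} (h : i < s.length) :
    s.drop i = s.getD i 0 :: s.drop (i + 1) := by
  rw [List.getD_eq_getElem _ _ h, List.drop_eq_getElem_cons h]

theorem outer_sum (s : List Int) (i : Nat) (r : List Int) :
    r.length = s.length → r.drop i = s.drop i →
    (i < s.length → (i = 0 ∨ s.getD (i - 1) 0 ≠ 0 ∨ s.getD i 0 ≠ 0)) →
    (outerLoop s r i).sum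
      = (r.take i).sum + fSpec (if i = 0 then 0 else s.getD (i - 1) 0) (s.drop i) := by
  fun_induction outerLoop s r i with
  | case1 r i hlt hz start e r' ih =>
    intro hrlen hrd h3
    have her : e = innerWhile s i := rfl
    have hr' : r' = if _h : 0 < i ∧ innerWhile s i < s.length then
        (if _h : s.getD (i - 1) 0 = s.getD (innerWhile s i) 0 ∧
            (s.getD (i - 1) 0 = -1 ∨ s.getD (i - 1) 0 = 1) then
          fillRange r i (innerWhile s i) (s.getD (i - 1) 0)
        else r)
      else r := rfl
    rw [her] at ih ⊢
    rw [hr'] at ih ⊢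
    clear her hr'
    have hk := innerWhile_eq s i
    have hcons : s.drop i = 0 :: s.drop (i + 1) := by
      have h0 := drop_eq_getD_cons hlt; rwa [hz] at h0
    have hk1 : 1 ≤ ((s.drop i).takeWhile (fun y => y == 0)).length := by
      rw [hcons]; simp
    have hke : ((s.drop i).takeWhile (fun y => y == 0)).length ≤ s.length - i := by
      have h5 := (List.takeWhile_prefix (p := fun y => (y : Int) == 0) (l := s.drop i)).length_le
      simpa using h5
    have hele : innerWhile s i ≤ s.length := by omega
    have hre : r.drop (innerWhile s i) = s.drop (innerWhile s i) :=
      drop_eq_of_drop_eq hrd (by omega)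
    have hdke : (s.drop i).drop ((s.drop i).takeWhile (fun y => y == 0)).length
        = s.drop (innerWhile s i) := by
      rw [List.drop_drop, hk]
    have hsdw : (s.drop i).dropWhile (fun y => y == 0) = s.drop (innerWhile s i) := by
      rw [dropWhile_eq_drop_takeWhile_length]; exact hdke
    have htakeW : (s.drop i).take ((s.drop i).takeWhile (fun y => y == 0)).length
        = (s.drop i).takeWhile (fun y => y == 0) := by
      obtain ⟨rest, hrest⟩ := List.takeWhile_prefix (p := fun y => (y : Int) == 0) (l := s.drop i)
      have h7 := List.take_left' (l₁ := (s.drop i).takeWhile (fun y => (y : Int) == 0)) (l₂ := rest) rfl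
      rwa [hrest] at h7
    have hsumtk : ((s.drop i).take ((s.drop i).takeWhile (fun y => y == 0)).length).sum = 0 := by
      rw [htakeW]; exact sum_takeWhile_zero _
    have hrtake : (r.take (innerWhile s i)).sum = (r.take i).sum := by
      rw [hk, List.take_add, List.sum_append, hrd, hsumtk, add_zero]
    have hstop : innerWhile s i < s.length → s.getD (innerWhile s i) 0 ≠ 0 :=
      innerWhile_stop s i
    have h3e : innerWhile s i < s.length →
        (innerWhile s i = 0 ∨ s.getD (innerWhile s i - 1) 0 ≠ 0 ∨ s.getD (innerWhile s i) 0 ≠ 0) :=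
      fun h => Or.inr (Or.inr (hstop h))
    by_cases hc1 : 0 < i ∧ innerWhile s i < s.length
    · by_cases hc2 : s.getD (i - 1) 0 = s.getD (innerWhile s i) 0 ∧
          (s.getD (i - 1) 0 = -1 ∨ s.getD (i - 1) 0 = 1)
      · -- fill happens
        rw [dif_pos hc1, dif_pos hc2] at ih ⊢
        have hfr : fillRange r i (innerWhile s i) (s.getD (i - 1) 0)
            = r.take i ++ List.replicate ((s.drop i).takeWhile (fun y => y == 0)).length (s.getD (i - 1) 0)
              ++ r.drop (innerWhile s i) := by
          have h6 := fillRange_eq (s.getD (i - 1) 0) ((s.drop i).takeWhile (fun y => y == 0)).length i r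
            (by omega)
          rw [show i + ((s.drop i).takeWhile (fun y => y == 0)).length = innerWhile s i by omega] at h6
          exact h6
        have hpre : (r.take i ++ List.replicate ((s.drop i).takeWhile (fun y => y == 0)).length (s.getD (i - 1) 0)).length
            = innerWhile s i := by simp; omega
        have hlen2 : (r.take i ++ List.replicate ((s.drop i).takeWhile (fun y => y == 0)).length (s.getD (i - 1) 0)
              ++ r.drop (innerWhile s i)).length = s.length := by
          simp; omega
        have hdrop2 : (r.take i ++ List.replicate ((s.drop i).takeWhile (fun y => y == 0)).length (s.getD (i - 1) 0)
              ++ r.drop (innerWhile s i)).drop (innerWhile s i) = s.drop (innerWhile s i) := by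
          rw [List.drop_left' hpre]; exact hre
        have htak2 : ((r.take i ++ List.replicate ((s.drop i).takeWhile (fun y => y == 0)).length (s.getD (i - 1) 0)
              ++ r.drop (innerWhile s i)).take (innerWhile s i)).sum
            = (r.take i).sum + (((s.drop i).takeWhile (fun y => y == 0)).length : Int) * s.getD (i - 1) 0 := by
          rw [List.take_left' hpre]
          simp [List.sum_replicate]
        rw [hfr] at ih ⊢
        rw [ih hlen2 hdrop2 h3e, htak2]
        have hy : s.getD (innerWhile s i) 0 ≠ 0 := hstop hc1.2
        have hecons : s.drop (innerWhile s i)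
            = s.getD (innerWhile s i) 0 :: s.drop (innerWhile s i + 1) := drop_eq_getD_cons hc1.2
        have hdw0 : (0 :: s.drop (i + 1)).dropWhile (fun y => y == 0)
            = s.getD (innerWhile s i) 0 :: s.drop (innerWhile s i + 1) := by
          rw [← hcons, hsdw, hecons]
        rw [hcons, fSpec_cons_zero _ _ _ _ hdw0, hecons, fSpec_cons_ne _ _ _ hy]
        rw [if_neg (by omega : ¬ i = 0)]
        rw [if_pos hc2]
        rw [show ((0 : Int) :: s.drop (i + 1)).takeWhile (fun y => y == 0)
              = (s.drop i).takeWhile (fun y => y == 0) by rw [hcons]]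
        ring
      · -- condition on neighbours fails: no fill
        rw [dif_pos hc1, dif_neg hc2] at ih ⊢
        rw [ih hrlen hre h3e, hrtake]
        have hy : s.getD (innerWhile s i) 0 ≠ 0 := hstop hc1.2
        have hecons : s.drop (innerWhile s i)
            = s.getD (innerWhile s i) 0 :: s.drop (innerWhile s i + 1) := drop_eq_getD_cons hc1.2
        have hdw0 : (0 :: s.drop (i + 1)).dropWhile (fun y => y == 0)
            = s.getD (innerWhile s i) 0 :: s.drop (innerWhile s i + 1) := by
          rw [← hcons, hsdw, hecons]
        rw [hcons, fSpec_cons_zero _ _ _ _ hdw0, hecons, fSpec_cons_ne _ _ _ hy]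
        rw [if_neg (by omega : ¬ i = 0)]
        rw [if_neg hc2]
        ring
    · -- no fill possible (i = 0 or the zero run reaches the end)
      rw [dif_neg hc1] at ih ⊢
      rw [ih hrlen hre h3e, hrtake]
      by_cases hel : innerWhile s i < s.length
      · -- then i = 0
        have hi0 : i = 0 := by omega
        have hy : s.getD (innerWhile s i) 0 ≠ 0 := hstop hel
        have hecons : s.drop (innerWhile s i)
            = s.getD (innerWhile s i) 0 :: s.drop (innerWhile s i + 1) := drop_eq_getD_cons hel
        have hdw0 : (0 :: s.drop (i + 1)).dropWhile (fun y => y == 0)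
            = s.getD (innerWhile s i) 0 :: s.drop (innerWhile s i + 1) := by
          rw [← hcons, hsdw, hecons]
        rw [hcons, fSpec_cons_zero _ _ _ _ hdw0, hecons, fSpec_cons_ne _ _ _ hy]
        rw [if_pos hi0]
        rw [if_neg (by simp : ¬ ((0 : Int) = s.getD (innerWhile s i) 0 ∧ ((0 : Int) = -1 ∨ (0 : Int) = 1)))]
        ring
      · -- zero run reaches the end of the list
        have hnil : s.drop (innerWhile s i) = [] := by simp; omega
        have hdw0 : (0 :: s.drop (i + 1)).dropWhile (fun y => y == 0) = [] := by
          rw [← hcons, hsdw, hnil]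
        rw [hcons, fSpec_cons_zero_nil _ _ hdw0, hnil]
        simp [fSpec]
  | case2 r i hlt hz ih =>
    intro hrlen hrd h3
    have hx : s.getD i 0 ≠ 0 := hz
    have hih := ih hrlen (drop_eq_of_drop_eq hrd (Nat.le_succ i))
      (fun _ => Or.inr (Or.inl (by simpa using hx)))
    rw [hih]
    have hcons : s.drop i = s.getD i 0 :: s.drop (i + 1) := drop_eq_getD_cons hlt
    rw [hcons, fSpec_cons_ne _ _ _ hx]
    have hir : i < r.length := by omega
    have hgetr : r[i] = s.getD i 0 := by
      have h4 := congrArg List.head? hrd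
      rw [List.head?_drop, List.head?_drop] at h4
      have h5 : s[i]? = some s[i] := List.getElem?_eq_getElem hlt
      rw [List.getElem?_eq_getElem hir, h5] at h4
      rw [List.getD_eq_getElem _ _ hlt]
      exact Option.some.inj h4
    rw [List.take_succ_eq_append_getElem hir, hgetr]
    simp only [if_neg (Nat.succ_ne_zero i), Nat.add_sub_cancel]
    simp [List.sum_append]
    ring
  | case3 r i hlt =>
    intro hrlen hrd _h3
    have hsd : s.drop i = [] := by simp; omega
    have hrt : r.take i = r := List.take_of_length_le (by omega)
    rw [hsd, hrt]
    simp [fSpec]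

theorem gapSum_head (v : Int) (n m : Nat) (gs : List (Int × Nat)) :
    gapSum ((v, n) :: gs) = gapSum ((v, m) :: gs) := by
  match gs with
  | [] => rfl
  | [g] => rfl
  | (z, n2) :: (c, m2) :: rest => simp [gapSum]

theorem gapSum_drop_head (w x : Int) (m n : Nat) (G : List (Int × Nat)) (hx : x ≠ 0) :
    gapSum ((w, m) :: (x, n) :: G) = gapSum ((x, n) :: G) := by
  match G with
  | [] => rfl
  | (c, m2) :: rest => simp [gapSum, hx]

theorem gapSum_split (g : Int × Nat) (x : Int) (n m : Nat) (G : List (Int × Nat)) (hx : x ≠ 0) :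
    gapSum (g :: (x, n + m) :: G) = gapSum (g :: (x, n) :: (x, m) :: G) := by
  obtain ⟨a, na⟩ := g
  match G with
  | [] => simp [gapSum, hx]
  | (c, m2) :: rest =>
    simp only [gapSum, hx, false_and, if_false, and_false]
    rw [gapSum_head x (n + m) m ((c, m2) :: rest)]
    ring

theorem gapSum_runs_cons (g : Int × Nat) (y : Int) (t : List Int) (hy : y ≠ 0) :
    gapSum (g :: runsOf (y :: t)) = gapSum (g :: (y, 1) :: runsOf t) := by
  match t with
  | [] => simp [runsOf, gapSum]
  | a :: t1 =>
    by_cases hay : a = y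
    · subst hay
      rw [runsOf, runsOf]
      simp only [List.takeWhile_cons, BEq.rfl, if_true, List.length_cons, List.drop_succ_cons]
      rw [show (1 : Nat) + ((t1.takeWhile (fun y => y == a)).length + 1)
            = 1 + (1 + (t1.takeWhile (fun y => y == a)).length) by omega]
      exact gapSum_split g a 1 (1 + (t1.takeWhile (fun y => y == a)).length)
        (runsOf (t1.drop (t1.takeWhile (fun y => y == a)).length)) hy
    · rw [runsOf]
      have : (((a :: t1).takeWhile (fun z => z == y)).length) = 0 := by
        simp [hay]
      simp [this]

theorem fSpec_runs : ∀ (n : Nat) (l : List Int) (p : Int), l.length ≤ n →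
    fSpec p l = l.sum + gapSum ((p, 1) :: runsOf l) := by
  intro n
  induction n with
  | zero =>
    intro l p hlen
    have : l = [] := by cases l <;> simp_all
    subst this
    simp [fSpec, runsOf, gapSum]
  | succ n ih =>
    intro l p hlen
    match l with
    | [] => simp [fSpec, runsOf, gapSum]
    | x :: t =>
      by_cases hx : x = 0
      · subst hx
        cases hr : (0 :: t).dropWhile (fun y => y == 0) with
        | nil =>
          rw [fSpec_cons_zero_nil p t hr]
          have hsum : (0 :: t).sum = 0 := by
            conv_lhs => rw [← List.takeWhile_append_dropWhile (p := fun y => (y : Int) == 0) (l := 0 :: t)]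
            rw [hr]
            simp [sum_takeWhile_zero]
          have hdw : (t.dropWhile (fun y => y == 0)) = [] := by
            rw [List.dropWhile_cons] at hr; simpa using hr
          have hdrop : t.drop (t.takeWhile (fun y => y == 0)).length = [] := by
            rw [← dropWhile_eq_drop_takeWhile_length]; exact hdw
          simp only [runsOf]
          rw [hdrop, hsum]
          simp [runsOf, gapSum]
        | cons y t' =>
          have hy : y ≠ 0 := by
            have := dropWhile_head_false (fun y => (y : Int) == 0) (0 :: t) y t' hr
            simpa using this
          rw [fSpec_cons_zero p y t t' hr]
          have hdw : (t.dropWhile (fun y => y == 0)) = y :: t' := by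
            rw [List.dropWhile_cons] at hr; simpa using hr
          have hdrop : t.drop (t.takeWhile (fun y => y == 0)).length = y :: t' := by
            rw [← dropWhile_eq_drop_takeWhile_length]; exact hdw
          have hlen' : t'.length ≤ n := by
            have h1 := List.length_dropWhile_le (fun y => (y : Int) == 0) t
            rw [hdw] at h1
            simp at h1 hlen
            omega
          have hsum : (0 :: t).sum = y + t'.sum := by
            conv_lhs => rw [← List.takeWhile_append_dropWhile (p := fun y => (y : Int) == 0) (l := 0 :: t)]
            rw [hr]
            simp [sum_takeWhile_zero]
          rw [ih t' y hlen', hsum]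
          simp only [runsOf]
          rw [hdrop]
          -- unfold one gapSum step: the (p,1),(0,k),(y,_) triple
          have hG : runsOf (y :: t')
              = (y, 1 + (t'.takeWhile (fun z => z == y)).length)
                :: runsOf (t'.drop (t'.takeWhile (fun z => z == y)).length) := by
            simp only [runsOf]
          rw [hG, gapSum, ← hG, gapSum_runs_cons _ y t' hy,
              gapSum_drop_head _ y _ 1 (runsOf t') hy]
          simp only [List.takeWhile_cons, BEq.rfl, if_true, List.length_cons, true_and]
          split_ifs with h1 <;> push_cast <;> ring
      · rw [fSpec_cons_ne p x t hx, ih t x (by simp at hlen; omega)]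
        rw [gapSum_runs_cons ((p, 1)) x t hx, gapSum_drop_head p x 1 1 (runsOf t) hx]
        simp
        ring

theorem gapSum_cons01 (G : List (Int × Nat)) : gapSum ((0, 1) :: G) = gapSum G := by
  match G with
  | [] => rfl
  | [g] => rfl
  | (z, n2) :: (c, m2) :: rest => simp [gapSum]

-- ===== VERDICT (by name: the statement is the Claim_ definition above) =====
theorem reduce_neutrality_spec : Claim_equal_reduce_neutrality := by
  intro word_list words _dom
  unfold Spec_reduce_neutrality reduce_neutrality reduce_neutrality_alt
  set s := word_list.map (fun w => word_sentiment w words) with hs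
  have hM := outer_sum s 0 s rfl rfl (by intro _; left; rfl)
  simp at hM
  rw [hM, fSpec_runs s.length s 0 le_rfl, gapSum_cons01]
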